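-- pv_equiv track=rewrite | github.com/taoszhang/EasyR1 | search_r1/search/test.py | _postprocess_responses
-- ===== SOURCE A (Python) =====
-- def _postprocess_responses(responses):
--     """Process responses to stop at the earliest operation tag (text_search, image_search, or answer)."""
--
--
--     stop_tags = ['</text_search>', '</image_search>', '</answer>']
--
--     def truncate_response(resp: str) -> str:
--         # 找到所有终止标签在字符串中的位置
--         tag_positions = [(resp.find(tag), tag) for tag in stop_tags if tag in resp]
--         if not tag_positions:
--             return resp  # 没有终止标签就保留原始内容
--         # 找到最早出现的终止标签及其位置
--         earliest_pos, tag = min(tag_positions, key=lambda x: x[0])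
--         return resp[:earliest_pos + len(tag)]  # 截断到终止标签结束
--
--     responses_str = [truncate_response(resp) for resp in responses]
--     return responses_str
-- ===== SOURCE B (Python) =====
-- def _postprocess_responses(responses):
--     """Process responses to stop at the earliest operation tag (text_search, image_search, or answer)."""
--
--     stop_tags = ['</text_search>', '</image_search>', '</answer>']
--
--     def truncate_response(resp: str) -> str:
--         # Single left-to-right scan: stop at the first position where any stop tag starts.
--         for i in range(len(resp)):
--             for tag in stop_tags:
--                 if resp.startswith(tag, i):
--                     return resp[:i + len(tag)]
--         return resp
--
--     return [truncate_response(resp) for resp in responses]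
-- ===== Notes on version B (the rewrite author's own statement) =====
-- stated objective: alternative
-- what changed: replaces the three separate str.find passes plus a min over (position, tag) pairs with one left-to-right scan that returns at the first position where any stop tag starts (no tag is a prefix of another, so the leftmost match is unique)
import Mathlib
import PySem

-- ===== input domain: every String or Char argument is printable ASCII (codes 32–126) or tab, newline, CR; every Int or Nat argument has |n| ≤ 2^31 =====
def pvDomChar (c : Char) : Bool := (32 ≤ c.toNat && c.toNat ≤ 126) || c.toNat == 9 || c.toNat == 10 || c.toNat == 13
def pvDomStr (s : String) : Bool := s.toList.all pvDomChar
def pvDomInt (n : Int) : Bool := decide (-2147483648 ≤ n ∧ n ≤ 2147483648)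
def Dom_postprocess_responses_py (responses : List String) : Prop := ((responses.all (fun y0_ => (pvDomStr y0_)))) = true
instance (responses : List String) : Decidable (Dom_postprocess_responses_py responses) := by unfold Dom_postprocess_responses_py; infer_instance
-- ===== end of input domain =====

-- B truncates each response by a single left-to-right scan for the first stop-tag start,
-- instead of A's three separate find passes plus a min over (position, tag) pairs (alternative decomposition, same cost).


-- ===== PORT A =====
-- the three stop tags, shared module-level context
def pvStopTags : List String := ["</text_search>", "</image_search>", "</answer>"]

-- A's truncate_response: positions of every contained tag, min by position, slice
def pvTruncA (resp : String) : String :=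
  let tag_positions : List (Int × String) :=
    (pvStopTags.filter (fun tag => PySem.Str.isIn tag resp)).map
      (fun tag => (PySem.Str.find resp tag, tag))
  if tag_positions.isEmpty then resp
  else
    match PySem.List.min? tag_positions (fun x => x.1) with
    | some (earliest_pos, tag) => PySem.Str.slice resp none (some (earliest_pos + PySem.Str.len tag))
    | none => resp  -- unreachable: min? is none only on [], excluded by the guard (Python's min on a nonempty list)

def postprocess_responses_py (responses : List String) : List String :=
  responses.map pvTruncA

-- ===== PORT B =====
-- B's scan over positions i = 0,1,…: pre is the reversed already-scanned prefix, rest the remaining suffix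
def pvTruncGo (tags : List (List Char)) (pre rest : List Char) : List Char :=
  match rest with
  | [] => pre.reverse
  | c :: cs =>
    match tags.find? (fun t => t.isPrefixOf (c :: cs)) with
    | some t => pre.reverse ++ (c :: cs).take t.length
    | none => pvTruncGo tags (c :: pre) cs

def pvTruncB (resp : String) : String :=
  String.ofList (pvTruncGo (pvStopTags.map String.toList) [] resp.toList)

def postprocess_responses_py_alt (responses : List String) : List String :=
  responses.map pvTruncB

-- ===== PRECONDITION & SPEC =====
def Spec_postprocess_responses_py (responses : List String) (out : List String) : Prop := out = postprocess_responses_py_alt responses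
instance (responses : List String) (out : List String) : Decidable (Spec_postprocess_responses_py responses out) := by unfold Spec_postprocess_responses_py; infer_instance

-- ===== CLAIM (what is proved, stated in full; the proofs are below) =====
def Claim_equal_postprocess_responses_py : Prop := ∀ (responses : List String), Dom_postprocess_responses_py responses → Spec_postprocess_responses_py responses (postprocess_responses_py responses)

-- ===== LEMMAS AND PROOFS =====

-- the tag lists, on the char side
def pvTagsL : List (List Char) := pvStopTags.map String.toList

-- no stop tag is a prefix of a different stop tag, so two tags matching at the same position coincide
theorem pvTags_not_prefix : ∀ t1 ∈ pvTagsL, ∀ t2 ∈ pvTagsL, t1 ≠ t2 → ¬ t1 <+: t2 := by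
  decide

theorem pvTags_uniq {t1 t2 : List Char} {l : List Char} (h1 : t1 ∈ pvTagsL) (h2 : t2 ∈ pvTagsL)
    (p1 : t1 <+: l) (p2 : t2 <+: l) : t1 = t2 := by
  by_contra hne
  rcases List.prefix_or_prefix_of_prefix p1 p2 with h | h
  · exact pvTags_not_prefix t1 h1 t2 h2 hne h
  · exact pvTags_not_prefix t2 h2 t1 h1 (Ne.symm hne) h

-- B's scan when no tag occurs anywhere in the remaining suffix
theorem pvTruncGo_none (pre rest : List Char)
    (h : ∀ t ∈ pvTagsL, ¬ t <:+: rest) :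
    pvTruncGo pvTagsL pre rest = pre.reverse ++ rest := by
  induction rest generalizing pre with
  | nil => simp [pvTruncGo]
  | cons c cs ih =>
    have hfind : pvTagsL.find? (fun t => t.isPrefixOf (c :: cs)) = none := by
      rw [List.find?_eq_none]
      intro t ht
      simp only [List.isPrefixOf_iff_prefix]
      exact fun hp => h t ht (List.IsPrefix.isInfix hp)
    rw [pvTruncGo, hfind]
    rw [ih (c :: pre) (fun t ht hinf => h t ht (List.infix_cons hinf))]
    simp

-- B's scan when the first tag occurrence starts at index i of the remaining suffix
theorem pvTruncGo_found (pre rest : List Char) (i : Nat) (t : List Char)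
    (hfind : pvTagsL.find? (fun t' => t'.isPrefixOf (rest.drop i)) = some t)
    (hi : i < rest.length)
    (hmin : ∀ j < i, ∀ t' ∈ pvTagsL, ¬ t' <+: rest.drop j) :
    pvTruncGo pvTagsL pre rest = pre.reverse ++ rest.take (i + t.length) := by
  induction rest generalizing pre i with
  | nil => simp at hi
  | cons c cs ih =>
    cases i with
    | zero =>
      simp only [List.drop_zero] at hfind
      rw [pvTruncGo, hfind]
      simp
    | succ j =>
      have hfind0 : pvTagsL.find? (fun t' => t'.isPrefixOf (c :: cs)) = none := by
        rw [List.find?_eq_none]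
        intro t' ht'
        simp only [List.isPrefixOf_iff_prefix]
        exact fun hp => hmin 0 (Nat.succ_pos j) t' ht' (by simpa using hp)
      rw [pvTruncGo, hfind0]
      have hdrop : (c :: cs).drop (j + 1) = cs.drop j := rfl
      rw [ih (c :: pre) j (by rw [← hdrop]; exact hfind) (by simpa using hi)
        (fun k hk t' ht' => hmin (k + 1) (by omega) t' ht')]
      simp [Nat.succ_add]

-- membership in A's tag_positions list
theorem pvMem_tag_positions (resp : String) (p : Int) (t : String) :
    (p, t) ∈ ((pvStopTags.filter (fun tag => PySem.Str.isIn tag resp)).map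
      (fun tag => (PySem.Str.find resp tag, tag))) ↔
    t ∈ pvStopTags ∧ PySem.Str.isIn t resp = true ∧ p = PySem.Str.find resp t := by
  simp only [List.mem_map, List.mem_filter]
  constructor
  · rintro ⟨tag, ⟨hmem, hin⟩, heq⟩
    simp only [Prod.mk.injEq] at heq
    obtain ⟨h1, h2⟩ := heq
    subst h2; exact ⟨hmem, hin, h1.symm⟩
  · rintro ⟨hmem, hin, hp⟩
    exact ⟨t, ⟨hmem, hin⟩, by simp [hp]⟩

-- find? returns the unique matching element
theorem pvFind?_unique {α : Type} (p : α → Bool) (xs : List α) (a : α) (ha : a ∈ xs)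
    (hpa : p a = true) (huniq : ∀ x ∈ xs, p x = true → x = a) : xs.find? p = some a := by
  induction xs with
  | nil => cases ha
  | cons x l ih =>
    by_cases hx : p x = true
    · have hxa := huniq x (List.mem_cons_self) hx
      subst hxa
      simp [List.find?, hx]
    · have hal : a ∈ l := by
        rcases List.mem_cons.mp ha with h | h
        · exact absurd (h ▸ hpa) hx
        · exact h
      simp only [List.find?, Bool.not_eq_true] at *
      rw [hx]
      exact ih hal (fun x hxl => huniq x (List.mem_cons_of_mem _ hxl))

-- the per-string equivalence
theorem pvTrunc_eq (resp : String) : pvTruncA resp = pvTruncB resp := by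
  unfold pvTruncA pvTruncB
  have hTags : pvStopTags.map String.toList = pvTagsL := rfl
  rw [hTags]
  by_cases hemp : (pvStopTags.filter (fun tag => PySem.Str.isIn tag resp)).map
      (fun tag => (PySem.Str.find resp tag, tag)) = []
  · -- no tag occurs: both return resp
    have hno : ∀ t ∈ pvTagsL, ¬ t <:+: resp.toList := by
      intro t ht
      obtain ⟨tag, htag, rfl⟩ := List.mem_map.mp ht
      have hf : PySem.Str.isIn tag resp = false := by
        by_contra hc
        have hmm : tag ∈ pvStopTags.filter (fun tag => PySem.Str.isIn tag resp) :=
          List.mem_filter.mpr ⟨htag, by simpa using hc⟩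
        rw [List.map_eq_nil_iff.mp hemp] at hmm
        cases hmm
      intro hinf
      have := (PySem.Chars.isIn_iff_infix tag.toList resp.toList).mpr hinf
      rw [PySem.Str.isIn_eq] at hf
      rw [hf] at this
      cases this
    rw [pvTruncGo_none [] resp.toList hno, hemp]
    simp only [List.isEmpty_nil, if_true]
    exact String.ofList_toList.symm
  · -- some tag occurs
    have hne : ((pvStopTags.filter (fun tag => PySem.Str.isIn tag resp)).map
      (fun tag => (PySem.Str.find resp tag, tag))).isEmpty = false := by
      simpa [List.isEmpty_iff] using hemp
    simp only [hne, Bool.false_eq_true, if_false]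
    rcases hm : PySem.List.min? ((pvStopTags.filter (fun tag => PySem.Str.isIn tag resp)).map
      (fun tag => (PySem.Str.find resp tag, tag))) (fun x => x.1) with _ | ⟨p, t⟩
    · exact absurd ((PySem.List.min?_eq_none_iff _ _).mp hm) hemp
    · have hmem := PySem.List.min?_mem hm
      have hmin := PySem.List.min?_isMin hm
      obtain ⟨htmem, hin, hp⟩ := (pvMem_tag_positions resp p t).mp hmem
      have htL : t.toList ∈ pvTagsL := List.mem_map_of_mem htmem
      have hpF : p = PySem.Chars.find resp.toList t.toList := by
        rw [hp, PySem.Str.find_eq]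
      have hinf : t.toList <:+: resp.toList := by
        rw [PySem.Str.isIn_eq] at hin
        exact (PySem.Chars.isIn_iff_infix t.toList resp.toList).mp hin
      have hF0 : 0 ≤ PySem.Chars.find resp.toList t.toList :=
        (PySem.Chars.find_nonneg_iff resp.toList t.toList).mpr hinf
      obtain ⟨hpre, hfirst⟩ := PySem.Chars.find_spec hF0
      set i := (PySem.Chars.find resp.toList t.toList).toNat with hi
      -- i is strictly inside l
      have hp0 : 0 ≤ p := hpF ▸ hF0
      have htcases : t = "</text_search>" ∨ t = "</image_search>" ∨ t = "</answer>" := by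
        simpa [pvStopTags] using htmem
      have htne : t.toList ≠ [] := by
        rcases htcases with rfl | rfl | rfl <;> decide
      have hilen : i < resp.toList.length := by
        have h1 := hpre.length_le
        have h2 : 0 < t.toList.length := List.length_pos_iff.mpr htne
        have h3 := List.length_drop (i := i) (l := resp.toList)
        omega
      -- every tag matching at position i equals t
      have huniq : ∀ t' ∈ pvTagsL, t'.isPrefixOf (resp.toList.drop i) = true → t' = t.toList :=
        fun t' ht' hp' => pvTags_uniq ht' htL (List.isPrefixOf_iff_prefix.mp hp') hpre
      have hfind : pvTagsL.find? (fun t' => t'.isPrefixOf (resp.toList.drop i)) = some t.toList :=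
        pvFind?_unique _ _ _ htL (List.isPrefixOf_iff_prefix.mpr hpre) huniq
      -- no tag matches before position i
      have hmin' : ∀ j < i, ∀ t' ∈ pvTagsL, ¬ t' <+: resp.toList.drop j := by
        intro j hj t' ht' hp'
        obtain ⟨tag', htag', rfl⟩ := List.mem_map.mp ht'
        have hinf' : tag'.toList <:+: resp.toList := hp'.isInfix.trans (List.drop_suffix j resp.toList).isInfix
        have hin' : PySem.Str.isIn tag' resp = true := by
          rw [PySem.Str.isIn_eq]
          exact (PySem.Chars.isIn_iff_infix tag'.toList resp.toList).mpr hinf'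
        have hmem' : (PySem.Str.find resp tag', tag') ∈
            ((pvStopTags.filter (fun tag => PySem.Str.isIn tag resp)).map
              (fun tag => (PySem.Str.find resp tag, tag))) :=
          (pvMem_tag_positions resp _ tag').mpr ⟨htag', hin', rfl⟩
        have hle : p ≤ PySem.Str.find resp tag' := hmin _ hmem'
        rw [PySem.Str.find_eq] at hle
        have hF'0 : 0 ≤ PySem.Chars.find resp.toList tag'.toList :=
          (PySem.Chars.find_nonneg_iff resp.toList tag'.toList).mpr hinf'
        obtain ⟨_, hfirst'⟩ := PySem.Chars.find_spec hF'0
        have hje : (PySem.Chars.find resp.toList tag'.toList).toNat ≤ j := by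
          by_contra hgt
          exact hfirst' j (by omega) hp'
        omega
      rw [pvTruncGo_found [] resp.toList i t.toList hfind hilen hmin']
      -- compare the two strings on the char side
      apply String.toList_inj.mp
      have hnn : 0 ≤ p + PySem.Str.len t := by
        rw [PySem.Str.len_eq]; omega
      have htoNat : (p + PySem.Str.len t).toNat = i + t.toList.length := by
        rw [PySem.Str.len_eq]
        omega
      simp only [PySem.Str.slice, PySem.Chars.slice_eq_listSlice]
      rw [PySem.List.slice_to _ hnn, htoNat]
      simp

theorem postprocess_responses_py_spec : Claim_equal_postprocess_responses_py := by
  intro responses _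
  unfold Spec_postprocess_responses_py postprocess_responses_py postprocess_responses_py_alt
  exact List.map_congr_left (fun r _ => pvTrunc_eq r)
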